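-- pv_equiv track=rewrite | github.com/DemonTrue/biostrips | cyt_combinations.py | sort_names
-- ===== SOURCE A (Python) =====
-- def get_original_label(label_long):
--     label = label_long.split('-')[0]
--     original_label = ''
--
--     for el in label:
--         if el.isdigit():
--             continue
--         else:
--             original_label += el
--
--     return original_label
--
-- def sort_names(names, labels):
--     indices_labels = [i for i in range(len(names))]
--     new_names, new_indices_labels = zip(*[(name, index) for name, index in sorted(zip(names, indices_labels))])
--
--     sort_names = []
--     sort_indices = []
--
--     for label in labels:
--         for i in range(len(new_names)):
--             if label == get_original_label(new_names[i]):
--                 sort_names.append(new_names[i])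
--                 sort_indices.append(new_indices_labels[i])
--
--     return sort_names, sort_indices
-- ===== SOURCE B (Python) =====
-- def sort_names(names, labels):
--     # Sort (name, original_index) pairs once, then group them by stripped-digit
--     # label in a dict, so emitting each requested label is a lookup, not a scan.
--     pairs = sorted((name, i) for i, name in enumerate(names))
--     groups = {}
--     for name, i in pairs:
--         head = name.split('-')[0]
--         key = ''.join(c for c in head if not c.isdigit())
--         groups.setdefault(key, []).append((name, i))
--     out_names = []
--     out_indices = []
--     for label in labels:
--         for name, i in groups.get(label, []):
--             out_names.append(name)
--             out_indices.append(i)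
--     return out_names, out_indices
-- ===== Notes on version B (the rewrite author's own statement) =====
-- stated objective: faster
-- what changed: B sorts the (name, index) pairs once and groups them into a dict keyed by the stripped-digit label, so each requested label is emitted by one dict lookup instead of A's rescan of all sorted names per label.
import Mathlib
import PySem

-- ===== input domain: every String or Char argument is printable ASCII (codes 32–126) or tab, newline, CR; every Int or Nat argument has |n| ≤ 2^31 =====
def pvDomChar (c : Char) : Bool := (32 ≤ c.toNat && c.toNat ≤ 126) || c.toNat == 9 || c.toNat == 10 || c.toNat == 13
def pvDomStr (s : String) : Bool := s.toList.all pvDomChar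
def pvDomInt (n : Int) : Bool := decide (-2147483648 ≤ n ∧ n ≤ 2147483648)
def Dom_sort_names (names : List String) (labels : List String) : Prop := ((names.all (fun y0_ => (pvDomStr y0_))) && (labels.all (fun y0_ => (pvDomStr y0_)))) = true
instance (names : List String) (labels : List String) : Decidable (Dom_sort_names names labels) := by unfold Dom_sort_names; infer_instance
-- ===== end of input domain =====

-- B replaces A's per-label rescan of all names with a dict grouping the sorted
-- (name, index) pairs by their stripped-digit label, built once.

-- ===== PORT A =====
-- get_original_label: label_long.split('-')[0] (split by a nonempty separator is never
-- empty, so the [0] never raises), then the character loop dropping digits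
def get_original_label (label_long : String) : String :=
  let label := ((PySem.Str.split? label_long "-").getD []).headD ""
  String.mk (label.toList.foldl
    (fun acc el => if PySem.Chars.isdigit el then acc else acc ++ [el]) [])

def sort_names (names : List String) (labels : List String) : List String × List Int :=
  let indices_labels : List Int := PySem.List.pyRange 0 (PySem.List.len names)
  -- sorted(zip(names, indices_labels)): Python tuple order = (name, index) lexicographic
  let pairs := PySem.List.sorted2 (names.zip indices_labels) (fun p => p.1) (fun p => p.2) false
  -- zip(*…) raises ValueError when names = [] (excluded by Pre_); otherwise it is the two projections
  let new_names := pairs.map (fun p => p.1)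
  let new_indices_labels := pairs.map (fun p => p.2)
  labels.foldl (fun acc label =>
    (PySem.List.pyRange 0 (PySem.List.len new_names)).foldl (fun acc2 i =>
      if label == get_original_label (PySem.List.pyGetD new_names i "") then
        (acc2.1 ++ [PySem.List.pyGetD new_names i ""],
         acc2.2 ++ [PySem.List.pyGetD new_indices_labels i 0])
      else acc2) acc) ([], [])

-- ===== PORT B =====
-- ''.join(c for c in name.split('-')[0] if not c.isdigit())
def orig_label_alt (name : String) : String :=
  let head := ((PySem.Str.split? name "-").getD []).headD ""
  String.mk (head.toList.filter (fun c => !PySem.Chars.isdigit c))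

def sort_names_alt (names : List String) (labels : List String) : List String × List Int :=
  let pairs := PySem.List.sorted2 ((PySem.List.enumerate names).map (fun q => (q.2, q.1)))
    (fun p => p.1) (fun p => p.2) false
  let groups : PySem.Dict String (List (String × Int)) :=
    pairs.foldl (fun d p => d.modify (orig_label_alt p.1) [] (fun l => l ++ [p])) PySem.Dict.empty
  labels.foldl (fun acc label =>
    (groups.getD label []).foldl (fun acc2 p => (acc2.1 ++ [p.1], acc2.2 ++ [p.2])) acc) ([], [])

-- ===== PRECONDITION & SPEC =====
-- Pre_ excludes only names = [], where Python A raises ValueError (zip(*[]) unpacks nothing)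
def Pre_sort_names (names : List String) (labels : List String) : Prop := names ≠ []
instance (names : List String) (labels : List String) : Decidable (Pre_sort_names names labels) := by unfold Pre_sort_names; infer_instance
def pvWitness_sort_names : List String × List String := (["b2-x", "a1", "a3"], ["a", "b"])

def Spec_sort_names (names : List String) (labels : List String) (out : List String × List Int) : Prop := out = sort_names_alt names labels
instance (names : List String) (labels : List String) (out : List String × List Int) : Decidable (Spec_sort_names names labels out) := by unfold Spec_sort_names; infer_instance

-- ===== CLAIM (what is proved, stated in full; the proofs are below) =====
def Claim_equal_sort_names : Prop := ∀ (names : List String) (labels : List String), Dom_sort_names names labels → Pre_sort_names names labels → Spec_sort_names names labels (sort_names names labels)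
-- ===== LEMMAS AND PROOFS =====

-- A's digit-dropping loop is B's filter
lemma strip_foldl_eq_filter (l acc : List Char) :
    l.foldl (fun acc el => if PySem.Chars.isdigit el then acc else acc ++ [el]) acc
      = acc ++ l.filter (fun c => !PySem.Chars.isdigit c) := by
  induction l generalizing acc with
  | nil => simp
  | cons x t ih => cases h : PySem.Chars.isdigit x <;> simp [h, ih]

lemma orig_label_eq (s : String) : get_original_label s = orig_label_alt s := by
  simp [get_original_label, orig_label_alt, strip_foldl_eq_filter]

-- [(name, i) for i, name in enumerate(xs)] = zip(xs, range(s, s + len(xs)))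
lemma enum_swap_eq_zip_range (xs : List String) (s : Int) :
    (PySem.List.enumerate xs s).map (fun q => (q.2, q.1))
      = xs.zip (PySem.List.pyRange s (s + xs.length)) := by
  induction xs generalizing s with
  | nil => simp [PySem.List.enumerate]
  | cons x t ih =>
    have hlt : s < s + ((x :: t).length : Int) := by
      have h0 : (0 : Int) < ((x :: t).length : Int) := by exact_mod_cast Nat.succ_pos t.length
      omega
    rw [PySem.List.enumerate_cons, PySem.List.pyRange_one_cons hlt]
    simp [ih]
    have hc : s + ((t.length : Int) + 1) = s + 1 + (t.length : Int) := by omega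
    rw [hc]

-- the grouping dict looked up at `label` is the filter of the pair list
lemma groups_getD (pairs : List (String × Int)) (label : String) :
    (pairs.foldl (fun d p => d.modify (orig_label_alt p.1) [] (fun l => l ++ [p]))
        PySem.Dict.empty).getD label []
      = pairs.filter (fun p => orig_label_alt p.1 == label) := by
  have hfold : pairs.foldl (fun d p => d.modify (orig_label_alt p.1) [] (fun l => l ++ [p]))
        PySem.Dict.empty
      = (pairs.map (fun p => (orig_label_alt p.1, p))).foldl
        (fun d q => d.modify q.1 [] (fun l => l ++ [q.2])) PySem.Dict.empty := by
    rw [List.foldl_map]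
  rw [hfold, PySem.Dict.getD_foldl_modify_append]
  simp [List.filter_map, Function.comp_def]

set_option maxHeartbeats 1000000 in
theorem sort_names_spec : Claim_equal_sort_names := by
  intro names labels _ _
  unfold Spec_sort_names sort_names sort_names_alt
  rw [enum_swap_eq_zip_range names 0]
  simp only [zero_add, PySem.List.len]
  apply PySem.List.foldl_congr_mem
  intro acc label _
  set pairs := PySem.List.sorted2 (names.zip (PySem.List.pyRange 0 (names.length : Int)))
    (fun p => p.1) (fun p => p.2) false 
  rw [groups_getD]
  have h1 : ∀ i : Int, PySem.List.pyGetD (pairs.map (fun p => p.1)) i ""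
      = (PySem.List.pyGetD pairs i ("", (0 : Int))).1 :=
    fun i => by simpa using PySem.List.pyGetD_map (fun p : String × Int => p.1) pairs i ("", 0)
  have h2 : ∀ i : Int, PySem.List.pyGetD (pairs.map (fun p => p.2)) i 0
      = (PySem.List.pyGetD pairs i ("", (0 : Int))).2 :=
    fun i => by simpa using PySem.List.pyGetD_map (fun p : String × Int => p.2) pairs i ("", 0)
  simp only [h1, h2, List.length_map]
  rw [show PySem.List.pyRange 0 ((pairs.length : Int))
      = PySem.List.pyRange 0 (PySem.List.len pairs) from rfl]
  rw [PySem.List.foldl_pyRange_pyGetD pairs ("", (0 : Int))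
    (fun acc2 p => if label == get_original_label p.1
      then (acc2.1 ++ [p.1], acc2.2 ++ [p.2]) else acc2) acc le_rfl]
  simp only [Int.toNat_zero, List.drop_zero]
  rw [PySem.List.foldl_if_eq_foldl_filter (fun p : String × Int => label == get_original_label p.1)
      (fun (acc2 : List String × List Int) (p : String × Int) => (acc2.1 ++ [p.1], acc2.2 ++ [p.2]))]
  congr 1
  apply List.filter_congr
  intro p _
  simp [orig_label_eq, eq_comm]
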